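-- pv_equiv track=rewrite | github.com/rahulr56/n-grams_Language_Predictor | Rachapalli_Assignment2.py | __genPairs
-- ===== SOURCE A (Python) =====
-- def __genPairs(data, length=2):
--     tempList = []
--     if length == 3:
--         for i in range(len(data) - 2):
--             tempList.append((data[i], data[i+1], data[i+2]))
--     elif length == 2:
--         for i in range(len(data) - 1):
--             tempList.append((data[i], data[i+1]))
--     else:
--         print ("This function generates pairs of sizes 2 and 3 only!")
--     return tempList
-- ===== SOURCE B (Python) =====
-- def __genPairs(data, length=2):
--     if length != 2 and length != 3:
--         print ("This function generates pairs of sizes 2 and 3 only!")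
--         return []
--     out = []
--     win = ()
--     for x in data:
--         win = (win + (x,))[-length:]
--         if len(win) == length:
--             out.append(win)
--     return out
-- ===== Notes on version B (the rewrite author's own statement) =====
-- stated objective: alternative
-- what changed: Replaces A's index loop over range(len(data)-k) with a single streaming pass that maintains a rolling window of the last `length` elements and emits it whenever it is full, never indexing or slicing `data`.
import Mathlib
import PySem

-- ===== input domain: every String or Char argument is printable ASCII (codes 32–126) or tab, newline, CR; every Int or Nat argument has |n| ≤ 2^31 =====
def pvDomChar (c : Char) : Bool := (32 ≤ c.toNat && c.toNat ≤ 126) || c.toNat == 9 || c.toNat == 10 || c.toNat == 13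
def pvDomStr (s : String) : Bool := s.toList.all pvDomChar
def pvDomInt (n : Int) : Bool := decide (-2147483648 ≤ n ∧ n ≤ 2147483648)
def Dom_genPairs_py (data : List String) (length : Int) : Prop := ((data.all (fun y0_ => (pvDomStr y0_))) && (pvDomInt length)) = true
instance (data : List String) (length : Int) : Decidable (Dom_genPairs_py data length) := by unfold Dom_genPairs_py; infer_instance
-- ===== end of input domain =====

-- B replaces A's index loop with one streaming pass that maintains a rolling window of the last
-- `length` elements (alternative decomposition; same cost). Both programs print the same message
-- in the invalid-length branch; the equivalence proved here is about the return value only.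

-- ===== PORT A =====
-- literal transliteration of A: indices via pyGetD (always in range here, since i < len-2 / len-1)
def genPairs_py (data : List String) (length : Int) : List (List String) :=
  let tempList : List (List String) := []
  if length == 3 then
    (PySem.List.pyRange 0 ((data.length : Int) - 2) 1).foldl
      (fun acc i => acc ++ [[PySem.List.pyGetD data i "", PySem.List.pyGetD data (i+1) "",
                             PySem.List.pyGetD data (i+2) ""]]) tempList
  else if length == 2 then
    (PySem.List.pyRange 0 ((data.length : Int) - 1) 1).foldl
      (fun acc i => acc ++ [[PySem.List.pyGetD data i "", PySem.List.pyGetD data (i+1) ""]]) tempList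
  else
    tempList

-- ===== PORT B =====
-- streaming pass; state = (out, win); `(win + (x,))[-length:]` is `drop (len - n)` (last n elements)
def genPairs_py_alt (data : List String) (length : Int) : List (List String) :=
  if !(length == 2) && !(length == 3) then []
  else
    let n := length.toNat
    (data.foldl (fun (st : List (List String) × List String) x =>
        let w := st.2 ++ [x]
        let w := w.drop (w.length - n)
        (if w.length == n then st.1 ++ [w] else st.1, w))
      ([], [])).1

-- ===== PRECONDITION & SPEC =====
def Spec_genPairs_py (data : List String) (length : Int) (out : List (List String)) : Prop := out = genPairs_py_alt data length
instance (data : List String) (length : Int) (out : List (List String)) : Decidable (Spec_genPairs_py data length out) := by unfold Spec_genPairs_py; infer_instance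

-- ===== CLAIM (what is proved, stated in full; the proofs are below) =====
def Claim_equal_genPairs_py : Prop := ∀ (data : List String) (length : Int), Dom_genPairs_py data length → Spec_genPairs_py data length (genPairs_py data length)

-- ===== LEMMAS AND PROOFS =====

-- last-n of a list (what `q[-n:]` computes for n ≥ 1)
def pvLastN (n : Nat) (q : List String) : List String := q.drop (q.length - n)

-- the emitted windows of B's fold, as a pure recursion mirroring the step function
def pvG (n : Nat) (w : List String) : List String → List (List String)
  | [] => []
  | x :: l =>
      let w' := (w ++ [x]).drop ((w ++ [x]).length - n)
      (if w'.length == n then [w'] else []) ++ pvG n w' l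

theorem pv_fold_eq_G (n : Nat) (l : List String) (w : List String) (acc : List (List String)) :
    (l.foldl (fun (st : List (List String) × List String) x =>
        let w := st.2 ++ [x]
        let w := w.drop (w.length - n)
        (if w.length == n then st.1 ++ [w] else st.1, w)) (acc, w)).1
      = acc ++ pvG n w l := by
  induction l generalizing w acc with
  | nil => simp [pvG]
  | cons x l ih =>
      simp only [List.foldl_cons, pvG]
      rw [ih]
      split <;> simp

theorem pv_lastN_snoc (n : Nat) (hn : 1 ≤ n) (p : List String) (x : String) :
    pvLastN n (pvLastN n p ++ [x]) = pvLastN n (p ++ [x]) := by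
  unfold pvLastN
  by_cases h : n ≤ p.length
  · have h1 : (p.drop (p.length - n)).length = n := by simp; omega
    rw [List.drop_append_of_le_length (by simp [h1]; omega),
        List.drop_append_of_le_length (by simp; omega),
        List.drop_drop]
    congr 2
    simp [h1]
    omega
  · have : p.length - n = 0 := by omega
    simp [this]

theorem pv_G_spec (n : Nat) (hn : 1 ≤ n) (l p : List String) :
    pvG n (pvLastN n p) l
      = (List.range' (p.length + 1 - n) ((p.length + l.length + 1 - n) - (p.length + 1 - n))).map
          (fun k => ((p ++ l).drop k).take n) := by
  induction l generalizing p with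
  | nil => simp [pvG]
  | cons x l ih =>
      have hsnoc := pv_lastN_snoc n hn p x
      have hlen : (pvLastN n (p ++ [x])).length = min n (p.length + 1) := by
        unfold pvLastN; simp; omega
      have hassoc : p ++ x :: l = (p ++ [x]) ++ l := by simp
      have ihx := ih (p ++ [x])
      simp only [List.length_append, List.length_singleton] at ihx
      show (if (pvLastN n (pvLastN n p ++ [x])).length == n then [pvLastN n (pvLastN n p ++ [x])] else [])
            ++ pvG n (pvLastN n (pvLastN n p ++ [x])) l = _
      rw [hsnoc, ihx]
      by_cases hfull : n ≤ p.length + 1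
      · have hcond : ((pvLastN n (p ++ [x])).length == n) = true := by
          simp [hlen]; omega
        simp only [hcond, if_true]
        have hc2 : p.length + 1 + l.length + 1 - n - (p.length + 1 + 1 - n) = l.length := by omega
        have hI : p.length + 1 + 1 - n = p.length + 1 - n + 1 := by omega
        have hc : p.length + (x :: l).length + 1 - n - (p.length + 1 - n) = l.length + 1 := by
          simp only [List.length_cons]; omega
        rw [hc2, hI, hc, List.range'_succ, List.map_cons, List.singleton_append, ← hassoc]
        congr 1
        -- emitted window equals the slice of the full list
        have hw : pvLastN n (p ++ [x]) = (p ++ [x]).drop (p.length + 1 - n) := by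
          unfold pvLastN; simp
        have hdrop : (p ++ x :: l).drop (p.length + 1 - n)
            = (p ++ [x]).drop (p.length + 1 - n) ++ l := by
          rw [hassoc, List.drop_append_of_le_length (by simp only [List.length_append, List.length_singleton]; omega)]
        rw [hdrop, ← hw, List.take_append_of_le_length (by rw [hlen]; omega),
            List.take_of_length_le (by rw [hlen]; omega)]
      · have hcond : ((pvLastN n (p ++ [x])).length == n) = false := by
          simp [hlen]; omega
        have hs : p.length + 1 - n = 0 := by omega
        have hs2 : p.length + 1 + 1 - n = 0 := by omega
        simp only [hcond, Bool.false_eq_true, if_false, List.nil_append, hassoc, hs, hs2]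
        congr 2 <;> first | rfl | (simp only [List.length_cons]; omega)

-- A's append-loop over range(b) as a map over List.range b.toNat
theorem pv_foldA (f : Int → List String) (b : Int) :
    (PySem.List.pyRange 0 b 1).foldl (fun acc i => acc ++ [f i]) []
      = (List.range b.toNat).map (fun (k : Nat) => f (k : Int)) := by
  rw [PySem.List.foldl_append_singleton_eq_map, PySem.List.pyRange_one]
  simp only [Int.sub_zero, List.map_map, List.nil_append]
  exact List.map_congr_left (fun a _ => by simp)

-- B's whole fold on a valid n, as windows of data
theorem pv_B_windows (n : Nat) (hn : 1 ≤ n) (data : List String) :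
    (data.foldl (fun (st : List (List String) × List String) x =>
        let w := st.2 ++ [x]
        let w := w.drop (w.length - n)
        (if w.length == n then st.1 ++ [w] else st.1, w)) ([], [])).1
      = (List.range (data.length + 1 - n)).map (fun k => (data.drop k).take n) := by
  rw [pv_fold_eq_G]
  have h0 : ([] : List String) = pvLastN n [] := by simp [pvLastN]
  rw [h0, pv_G_spec n hn]
  have e : 1 - n = 0 := by omega
  simp only [List.length_nil, List.nil_append, Nat.zero_add, e, Nat.sub_zero,
    List.range_eq_range']

theorem pv_window_two (data : List String) (k : Nat) (hk : k + 2 ≤ data.length) :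
    (data.drop k).take 2 = [data.getD k "", data.getD (k+1) ""] := by
  apply List.ext_getElem
  · simp; omega
  · intro i h1 h2
    simp only [List.length_take, List.length_drop] at h1
    have hi : i < 2 := by omega
    interval_cases i
    · simp [List.getElem_take, List.getElem_drop, List.getD,
        List.getElem?_eq_getElem (show k < data.length by omega)]
    · simp [List.getElem_take, List.getElem_drop, List.getD,
        List.getElem?_eq_getElem (show k + 1 < data.length by omega)]

theorem pv_window_three (data : List String) (k : Nat) (hk : k + 3 ≤ data.length) :
    (data.drop k).take 3 = [data.getD k "", data.getD (k+1) "", data.getD (k+2) ""] := by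
  apply List.ext_getElem
  · simp; omega
  · intro i h1 h2
    simp only [List.length_take, List.length_drop] at h1
    have hi : i < 3 := by omega
    interval_cases i
    · simp [List.getElem_take, List.getElem_drop, List.getD,
        List.getElem?_eq_getElem (show k < data.length by omega)]
    · simp [List.getElem_take, List.getElem_drop, List.getD,
        List.getElem?_eq_getElem (show k + 1 < data.length by omega)]
    · simp [List.getElem_take, List.getElem_drop, List.getD,
        List.getElem?_eq_getElem (show k + 2 < data.length by omega)]

-- ===== VERDICT (by name: the statement is the Claim_ definition above) =====
theorem genPairs_py_spec : Claim_equal_genPairs_py := by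
  intro data length _
  unfold Spec_genPairs_py genPairs_py genPairs_py_alt
  by_cases h3 : (length == 3) = true
  · have h2 : (length == 2) = false := by simp at h3; simp; omega
    simp only [h3, h2, Bool.not_true, Bool.and_false, Bool.not_false, Bool.false_eq_true, if_false]
    have hl : length.toNat = 3 := by simp at h3; omega
    rw [hl, pv_foldA, pv_B_windows 3 (by omega)]
    have hb : ((data.length : Int) - 2).toNat = data.length + 1 - 3 := by omega
    rw [hb]
    refine List.map_congr_left (fun k hk => ?_)
    simp only [List.mem_range] at hk
    rw [pv_window_three data k (by omega)]
    have e1 : ((k : Int) + 1) = ((k + 1 : Nat) : Int) := by push_cast; ring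
    have e2 : ((k : Int) + 2) = ((k + 2 : Nat) : Int) := by push_cast; ring
    rw [e1, e2, PySem.List.pyGetD_natCast, PySem.List.pyGetD_natCast, PySem.List.pyGetD_natCast]
  · by_cases h2 : (length == 2) = true
    · simp only [h3, h2, Bool.false_eq_true, if_false, Bool.not_true]
      have hl : length.toNat = 2 := by simp at h2; omega
      rw [hl, pv_foldA, pv_B_windows 2 (by omega)]
      have hb : ((data.length : Int) - 1).toNat = data.length + 1 - 2 := by omega
      rw [hb]
      refine List.map_congr_left (fun k hk => ?_)
      simp only [List.mem_range] at hk
      rw [pv_window_two data k (by omega)]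
      have e1 : ((k : Int) + 1) = ((k + 1 : Nat) : Int) := by push_cast; ring
      rw [e1, PySem.List.pyGetD_natCast, PySem.List.pyGetD_natCast]
    · simp [h3, h2]
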